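-- pv_equiv track=rewrite | github.com/neur0map/ipcrawler | src/core/scorer/database_scorer.py | _analyze_discovered_paths
-- ===== SOURCE A (Python) =====
-- from typing import List, Dict, Set, Optional, Any, Tuple
--
-- def _analyze_discovered_paths(paths: List[str]) -> Dict[str, bool]:
--     """Analyze discovered paths to infer characteristics"""
--     analysis = {
--         'has_admin_paths': False,
--         'has_api_paths': False,
--         'deep_structure': False,
--         'has_uploads': False,
--         'has_config': False
--     }
--
--     admin_indicators = ['admin', 'manage', 'control', 'dashboard', 'cp']
--     api_indicators = ['api', 'rest', 'graphql', 'json', 'xml']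
--     upload_indicators = ['upload', 'file', 'media', 'assets']
--     config_indicators = ['config', 'settings', 'conf', '.env']
--
--     for path in paths:
--         path_lower = path.lower()
--
--         # Check for admin paths
--         if any(indicator in path_lower for indicator in admin_indicators):
--             analysis['has_admin_paths'] = True
--
--         # Check for API paths
--         if any(indicator in path_lower for indicator in api_indicators):
--             analysis['has_api_paths'] = True
--
--         # Check for upload paths
--         if any(indicator in path_lower for indicator in upload_indicators):
--             analysis['has_uploads'] = True
--
--         # Check for config paths
--         if any(indicator in path_lower for indicator in config_indicators):
--             analysis['has_config'] = True
--
--         # Check for deep directory structure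
--         if path.count('/') > 3:
--             analysis['deep_structure'] = True
--
--     return analysis
-- ===== SOURCE B (Python) =====
-- def _analyze_discovered_paths(paths):
--     """Analyze discovered paths to infer characteristics (per-flag any() scans)."""
--     def hits(indicators):
--         return any(ind in p.lower() for p in paths for ind in indicators)
--
--     return {
--         'has_admin_paths': hits(['admin', 'manage', 'control', 'dashboard', 'cp']),
--         'has_api_paths': hits(['api', 'rest', 'graphql', 'json', 'xml']),
--         'deep_structure': any(p.count('/') > 3 for p in paths),
--         'has_uploads': hits(['upload', 'file', 'media', 'assets']),
--         'has_config': hits(['config', 'settings', 'conf', '.env']),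
--     }
-- ===== Notes on version B (the rewrite author's own statement) =====
-- stated objective: simpler
-- what changed: Replaces the single loop that mutates five flags with five independent any() scans, one per category, building the dict directly from the five expressions (multi-pass vs single-pass).
import Mathlib
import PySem

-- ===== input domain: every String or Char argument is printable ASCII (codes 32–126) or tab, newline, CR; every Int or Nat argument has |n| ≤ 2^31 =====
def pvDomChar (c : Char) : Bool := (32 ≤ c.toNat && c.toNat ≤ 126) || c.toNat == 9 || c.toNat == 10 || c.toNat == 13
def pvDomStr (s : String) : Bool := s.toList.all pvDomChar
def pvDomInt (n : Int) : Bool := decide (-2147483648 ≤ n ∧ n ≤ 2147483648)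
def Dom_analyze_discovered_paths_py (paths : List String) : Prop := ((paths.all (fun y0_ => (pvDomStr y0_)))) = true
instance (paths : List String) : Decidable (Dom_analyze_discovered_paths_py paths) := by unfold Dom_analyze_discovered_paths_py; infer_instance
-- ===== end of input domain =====

-- B replaces A's single loop mutating five flags with five independent per-category any() scans; objective: simpler.

-- ===== PORT A =====
-- A's indicator lists
def pvAdminInd : List String := ["admin", "manage", "control", "dashboard", "cp"]
def pvApiInd : List String := ["api", "rest", "graphql", "json", "xml"]
def pvUploadInd : List String := ["upload", "file", "media", "assets"]
def pvConfigInd : List String := ["config", "settings", "conf", ".env"]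

-- state = dict flags in insertion order: (has_admin_paths, has_api_paths, deep_structure, has_uploads, has_config)
def pvStepA (st : Bool × Bool × Bool × Bool × Bool) (path : String) : Bool × Bool × Bool × Bool × Bool :=
  let pl := PySem.Str.lower path
  let st := if pvAdminInd.any (fun i => PySem.Str.isIn i pl) then (true, st.2.1, st.2.2.1, st.2.2.2.1, st.2.2.2.2) else st
  let st := if pvApiInd.any (fun i => PySem.Str.isIn i pl) then (st.1, true, st.2.2.1, st.2.2.2.1, st.2.2.2.2) else st
  let st := if pvUploadInd.any (fun i => PySem.Str.isIn i pl) then (st.1, st.2.1, st.2.2.1, true, st.2.2.2.2) else st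
  let st := if pvConfigInd.any (fun i => PySem.Str.isIn i pl) then (st.1, st.2.1, st.2.2.1, st.2.2.2.1, true) else st
  let st := if 3 < PySem.Str.count path "/" then (st.1, st.2.1, true, st.2.2.2.1, st.2.2.2.2) else st
  st

def analyze_discovered_paths_py (paths : List String) : List (String × Bool) :=
  let st := paths.foldl pvStepA (false, false, false, false, false)
  [("has_admin_paths", st.1), ("has_api_paths", st.2.1), ("deep_structure", st.2.2.1),
   ("has_uploads", st.2.2.2.1), ("has_config", st.2.2.2.2)]

-- ===== PORT B =====
def pvHits (paths : List String) (indicators : List String) : Bool :=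
  paths.any (fun p => indicators.any (fun i => PySem.Str.isIn i (PySem.Str.lower p)))

def analyze_discovered_paths_py_alt (paths : List String) : List (String × Bool) :=
  [("has_admin_paths", pvHits paths ["admin", "manage", "control", "dashboard", "cp"]),
   ("has_api_paths", pvHits paths ["api", "rest", "graphql", "json", "xml"]),
   ("deep_structure", paths.any (fun p => 3 < PySem.Str.count p "/")),
   ("has_uploads", pvHits paths ["upload", "file", "media", "assets"]),
   ("has_config", pvHits paths ["config", "settings", "conf", ".env"])]

-- ===== PRECONDITION & SPEC =====
def Spec_analyze_discovered_paths_py (paths : List String) (out : List (String × Bool)) : Prop := out = analyze_discovered_paths_py_alt paths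
instance (paths : List String) (out : List (String × Bool)) : Decidable (Spec_analyze_discovered_paths_py paths out) := by unfold Spec_analyze_discovered_paths_py; infer_instance

-- ===== CLAIM (what is proved, stated in full; the proofs are below) =====
def Claim_equal_analyze_discovered_paths_py : Prop := ∀ (paths : List String), Dom_analyze_discovered_paths_py paths → Spec_analyze_discovered_paths_py paths (analyze_discovered_paths_py paths)

-- ===== LEMMAS AND PROOFS =====
theorem pvStepA_or (st : Bool × Bool × Bool × Bool × Bool) (p : String) :
    pvStepA st p =
      (st.1 || pvAdminInd.any (fun i => PySem.Str.isIn i (PySem.Str.lower p)),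
       st.2.1 || pvApiInd.any (fun i => PySem.Str.isIn i (PySem.Str.lower p)),
       st.2.2.1 || decide (3 < PySem.Str.count p "/"),
       st.2.2.2.1 || pvUploadInd.any (fun i => PySem.Str.isIn i (PySem.Str.lower p)),
       st.2.2.2.2 || pvConfigInd.any (fun i => PySem.Str.isIn i (PySem.Str.lower p))) := by
  obtain ⟨a, b, c, d, e⟩ := st
  simp only [pvStepA]
  split_ifs <;> simp_all

theorem foldl_stepA (paths : List String) (a b c d e : Bool) :
    paths.foldl pvStepA (a, b, c, d, e) =
      (a || pvHits paths pvAdminInd,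
       b || pvHits paths pvApiInd,
       c || paths.any (fun p => 3 < PySem.Str.count p "/"),
       d || pvHits paths pvUploadInd,
       e || pvHits paths pvConfigInd) := by
  induction paths generalizing a b c d e with
  | nil => simp [pvHits]
  | cons p ps ih =>
    simp only [List.foldl_cons, pvStepA_or, ih, pvHits, List.any_cons]
    simp [Bool.or_assoc]

theorem analyze_discovered_paths_py_spec : Claim_equal_analyze_discovered_paths_py := by
  intro paths _
  show _ = _
  simp [analyze_discovered_paths_py, analyze_discovered_paths_py_alt, foldl_stepA,
    pvAdminInd, pvApiInd, pvUploadInd, pvConfigInd]
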